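-- pv_equiv track=rewrite | github.com/K-Diger/Algorithm | Acmicpc(풀이)/1929번(소수 구하기)/main.py | m_to_n_prime
-- ===== SOURCE A (Python) =====
-- def m_to_n_prime(m, n):
--     prime = [2, ]
--     for i in range(m, n+1):
--         for j in range(2, i):
--             if i % j == 0:
--                 break
--             elif j == i - 1:
--                 prime.append(i)
--     return prime
-- ===== SOURCE B (Python) =====
-- def m_to_n_prime(m, n):
--     primes = [2]
--     for i in range(max(m, 3), n + 1):
--         d = 2
--         while d * d <= i:
--             if i % d == 0:
--                 break
--             d += 1
--         else:
--             primes.append(i)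
--     return primes
-- ===== Notes on version B (the rewrite author's own statement) =====
-- stated objective: alternative
-- what changed: B clamps the range start to 3 and tests each candidate by trial division only up to its square root (while d*d <= i), instead of A's scan over every j in 2..i-1 with a sentinel j == i-1 check.
import Mathlib
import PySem

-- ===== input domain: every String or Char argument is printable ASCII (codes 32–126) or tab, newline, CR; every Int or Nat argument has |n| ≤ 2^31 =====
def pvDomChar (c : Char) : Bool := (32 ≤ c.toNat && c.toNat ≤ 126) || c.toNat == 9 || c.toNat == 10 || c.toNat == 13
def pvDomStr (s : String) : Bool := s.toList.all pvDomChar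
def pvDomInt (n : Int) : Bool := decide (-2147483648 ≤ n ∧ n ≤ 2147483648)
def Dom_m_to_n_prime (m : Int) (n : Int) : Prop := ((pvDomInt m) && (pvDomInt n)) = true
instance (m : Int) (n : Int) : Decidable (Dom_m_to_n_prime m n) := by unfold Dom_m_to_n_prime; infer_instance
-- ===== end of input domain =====

-- B replaces A's scan of every j in 2..i-1 (with the j == i-1 sentinel append) by
-- trial division only up to the square root of each candidate, starting the range at max(m, 3).

-- ===== PORT A =====
-- inner 'for j in range(2, i)' loop of A, with break on i % j == 0 and append on j == i - 1
def pvInnerA (i : Int) : List Int → List Int → List Int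
  | [], acc => acc
  | j :: js, acc =>
    if PySem.Int.mod i j = 0 then acc
    else if j = i - 1 then pvInnerA i js (acc ++ [i])
    else pvInnerA i js acc

def m_to_n_prime (m : Int) (n : Int) : List Int :=
  (PySem.List.pyRange m (n + 1) 1).foldl
    (fun prime i => pvInnerA i (PySem.List.pyRange 2 i 1) prime) [2]

-- ===== PORT B =====
-- 'while d * d <= i: if i % d == 0: break; d += 1' — returns true iff the loop ends without break
def pvTrialB (i : Int) (d : Int) : Bool :=
  if h : d * d ≤ i then
    if PySem.Int.mod i d = 0 then false
    else pvTrialB i (d + 1)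
  else true
termination_by (i + 1 - d).toNat
decreasing_by
  have h1 : (0 : Int) ≤ i := le_trans (mul_self_nonneg d) h
  have h2 : 2 * d ≤ i + 1 := by nlinarith [sq_nonneg (d - 1)]
  omega

def m_to_n_prime_alt (m : Int) (n : Int) : List Int :=
  (PySem.List.pyRange (max m 3) (n + 1) 1).foldl
    (fun primes i => if pvTrialB i 2 then primes ++ [i] else primes) [2]

-- ===== PRECONDITION & SPEC =====
def Spec_m_to_n_prime (m : Int) (n : Int) (out : List Int) : Prop := out = m_to_n_prime_alt m n
instance (m : Int) (n : Int) (out : List Int) : Decidable (Spec_m_to_n_prime m n out) := by unfold Spec_m_to_n_prime; infer_instance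

-- ===== CLAIM (what is proved, stated in full; the proofs are below) =====
def Claim_equal_m_to_n_prime : Prop := ∀ (m : Int) (n : Int), Dom_m_to_n_prime m n → Spec_m_to_n_prime m n (m_to_n_prime m n)

-- ===== LEMMAS AND PROOFS =====

-- "i has no divisor in [a, i)" as a Bool, the condition A's inner loop computes
def pvNoDiv (a i : Int) : Bool :=
  (PySem.List.pyRange a i 1).all (fun j => decide (PySem.Int.mod i j ≠ 0))

theorem pvInnerA_spec (i : Int) : ∀ (a : Int) (acc : List Int), 2 ≤ a → a < i →
    pvInnerA i (PySem.List.pyRange a i 1) acc =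
      (if pvNoDiv a i then acc ++ [i] else acc) := by
  intro a acc h2 hlt
  generalize hk : (i - a).toNat = k
  induction k generalizing a acc with
  | zero => omega
  | succ k ih =>
    rw [PySem.List.pyRange_one_cons hlt]
    unfold pvInnerA
    by_cases hmod : PySem.Int.mod i a = 0
    · rw [if_pos hmod]
      have : pvNoDiv a i = false := by
        unfold pvNoDiv
        rw [PySem.List.pyRange_one_cons hlt]
        simp [hmod]
      simp [this]
    · rw [if_neg hmod]
      have hnd : pvNoDiv a i = pvNoDiv (a + 1) i := by
        unfold pvNoDiv
        rw [PySem.List.pyRange_one_cons hlt]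
        simp [hmod]
      by_cases hlast : a = i - 1
      · rw [if_pos hlast]
        have hnil : PySem.List.pyRange (a + 1) i 1 = [] :=
          PySem.List.pyRange_one_eq_nil (by omega)
        have hnd1 : pvNoDiv (a + 1) i = true := by
          unfold pvNoDiv; rw [hnil]; rfl
        rw [hnil]
        unfold pvInnerA
        rw [hnd, hnd1]
        simp
      · rw [if_neg hlast]
        have hlt1 : a + 1 < i := by omega
        rw [ih (a + 1) acc (by omega) hlt1 (by omega), hnd]

theorem pvTrialB_spec (i : Int) : ∀ (d : Int), 2 ≤ d →
    (pvTrialB i d = true ↔ ∀ e, d ≤ e → e * e ≤ i → PySem.Int.mod i e ≠ 0) := by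
  intro d hd
  generalize hk : (i + 1 - d).toNat = k
  induction k generalizing d with
  | zero =>
    have hid : i < d := by omega
    unfold pvTrialB
    rw [dif_neg (by
      intro hcon
      nlinarith [mul_pos (show (0:Int) < d by omega) (show (0:Int) < d - 1 by omega)])]
    constructor
    · intro _ e hde hee
      exact absurd hee (by
        intro hcon
        nlinarith [mul_pos (show (0:Int) < e by omega) (show (0:Int) < e - 1 by omega)])
    · intro _; rfl
  | succ k ih =>
    unfold pvTrialB
    by_cases hle : d * d ≤ i
    · rw [dif_pos hle]
      by_cases hmod : PySem.Int.mod i d = 0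
      · rw [if_pos hmod]
        constructor
        · intro h; exact absurd h (by simp)
        · intro hall; exact absurd hmod (hall d le_rfl hle)
      · rw [if_neg hmod]
        have hdi : d ≤ i := by nlinarith
        rw [ih (d + 1) (by omega) (by omega)]
        constructor
        · intro hall e hde hee
          rcases eq_or_lt_of_le hde with heq | hlt
          · exact heq ▸ hmod
          · exact hall e (by omega) hee
        · intro hall e hde hee
          exact hall e (by omega) hee
    · rw [dif_neg hle]
      constructor
      · intro _ e hde hee
        have : d * d ≤ e * e := by nlinarith
        exact absurd hee (by omega)
      · intro _; rfl

-- the sqrt-bounded test and the full scan agree for i ≥ 3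
theorem pvCond_eq (i : Int) : pvNoDiv 2 i = pvTrialB i 2 := by
  have hchar : pvNoDiv 2 i = true ↔ ∀ j, 2 ≤ j → j < i → PySem.Int.mod i j ≠ 0 := by
    unfold pvNoDiv
    simp only [List.all_eq_true, decide_eq_true_eq, PySem.List.mem_pyRange_one]
    constructor
    · intro h j h1 h2; exact h j ⟨h1, h2⟩
    · intro h j ⟨h1, h2⟩; exact h j h1 h2
  have htri := pvTrialB_spec i 2 le_rfl
  rw [Bool.eq_iff_iff, hchar, htri]
  constructor
  · -- no divisor below i ⇒ in particular none with square ≤ i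
    intro h e h2e hee
    exact h e h2e (by nlinarith [mul_pos (show (0:Int) < e by omega) (show (0:Int) < e - 1 by omega)])
  · -- a divisor j in [2, i) yields a cofactor; the smaller of the two has square ≤ i
    intro h j h2j hji hmod
    obtain ⟨c, hc⟩ := (PySem.Int.mod_eq_zero_iff_dvd i j).mp hmod
    have hc2 : 2 ≤ c := by
      by_contra hcon
      push Not at hcon
      nlinarith [mul_le_mul_of_nonneg_left (show c ≤ 1 by omega) (show (0:Int) ≤ j by omega)]
    rcases le_total j c with hjc | hcj
    · exact h j h2j (by nlinarith [mul_le_mul_of_nonneg_left hjc (show (0:Int) ≤ j by omega)]) hmod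
    · have hcmod : PySem.Int.mod i c = 0 :=
        (PySem.Int.mod_eq_zero_iff_dvd i c).mpr ⟨j, by rw [hc]; ring⟩
      exact h c hc2 (by nlinarith [mul_le_mul_of_nonneg_left hcj (show (0:Int) ≤ c by omega)]) hcmod

-- A's fold does nothing on candidates below 3
theorem pvFold_low (l : List Int) (init : List Int) (h : ∀ x ∈ l, x < 3) :
    l.foldl (fun prime i => pvInnerA i (PySem.List.pyRange 2 i 1) prime) init = init := by
  rw [PySem.List.foldl_congr_mem l _ (fun a _ => a) init
    (fun acc x hx => by
      rw [PySem.List.pyRange_one_eq_nil (by have := h x hx; omega)]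
      rfl)]
  exact List.foldl_fixed l

-- on a range of candidates ≥ 3 the two folds agree step for step
theorem pvFold_high (l : List Int) (init : List Int) (h : ∀ x ∈ l, 3 ≤ x) :
    l.foldl (fun prime i => pvInnerA i (PySem.List.pyRange 2 i 1) prime) init =
    l.foldl (fun primes i => if pvTrialB i 2 then primes ++ [i] else primes) init := by
  apply PySem.List.foldl_congr_mem
  intro acc x hx
  have hx3 := h x hx
  rw [pvInnerA_spec x 2 acc le_rfl (by omega), pvCond_eq x]

-- ===== VERDICT (by name: the statement is the Claim_ definition above) =====
theorem m_to_n_prime_spec : Claim_equal_m_to_n_prime := by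
  intro m n _
  unfold Spec_m_to_n_prime m_to_n_prime m_to_n_prime_alt
  by_cases hm : 3 ≤ m
  · rw [max_eq_left hm]
    exact pvFold_high _ _ (fun x hx => le_trans hm (PySem.List.mem_pyRange_one.mp hx).1)
  · rw [max_eq_right (by omega)]
    by_cases hn : n + 1 ≤ 3
    · rw [PySem.List.pyRange_one_eq_nil (show n + 1 ≤ 3 from hn)]
      exact pvFold_low _ _ (fun x hx => by
        have := PySem.List.mem_pyRange_one.mp hx; omega)
    · rw [PySem.List.pyRange_one_append m 3 (n + 1) (by omega) (by omega), List.foldl_append]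
      have hlow := pvFold_low (PySem.List.pyRange m 3 1) [2] (fun x hx => by
        have := PySem.List.mem_pyRange_one.mp hx; omega)
      rw [hlow]
      exact pvFold_high _ _ (fun x hx => (PySem.List.mem_pyRange_one.mp hx).1)
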